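-- pv_equiv track=rewrite | github.com/BrunoFG/Cacarecos | Python_Matematica_Discreta/_fucoesAritmeticas.py | mi
-- ===== SOURCE A (Python) =====
-- def mi(n):
--     if n==1:
--         return 1
--     for i in range(2,n+1):
--         if n%(i**2)==0:
--             return 0
--     r=0
--     for i in range(2,n):
--         if n%i==0:
--             r+=1
--     if r==0:
--         return -1
--     return (-1)**r
-- ===== SOURCE B (Python) =====
-- def mi(n):
--     if n == 1:
--         return 1
--     has_div = False
--     i = 2
--     while i * i <= n:
--         if n % (i * i) == 0:
--             return 0
--         if n % i == 0:
--             has_div = True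
--         i += 1
--     return 1 if has_div else -1
-- ===== Notes on version B (the rewrite author's own statement) =====
-- stated objective: faster
-- what changed: B replaces A's two full scans up to n (square-factor test, then counting all proper divisors and raising minus one to that count) by one loop up to sqrt(n) that tests square factors and detects a proper divisor by pairing d with n/d, using that for squarefree n the proper divisors pair off so their count is even; intended as faster (sqrt(n) vs n loop bound), with the measured speedup large on inputs without a small square factor while A too exits early when one exists.
import Mathlib
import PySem

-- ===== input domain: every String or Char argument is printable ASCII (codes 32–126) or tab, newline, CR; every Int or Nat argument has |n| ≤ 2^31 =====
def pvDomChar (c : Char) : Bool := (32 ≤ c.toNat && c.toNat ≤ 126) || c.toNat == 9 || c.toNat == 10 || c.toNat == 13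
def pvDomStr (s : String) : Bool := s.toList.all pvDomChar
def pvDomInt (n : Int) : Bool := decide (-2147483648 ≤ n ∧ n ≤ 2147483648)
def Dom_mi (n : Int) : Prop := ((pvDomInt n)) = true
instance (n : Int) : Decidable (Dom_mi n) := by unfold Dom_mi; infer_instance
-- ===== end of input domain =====

-- B replaces A's two scans up to n by a single loop up to √n (square-factor test and
-- divisor pairing); same return value on every int. Intended as faster (loop bound √n instead
-- of n); a timing run confirms large speedups on inputs without a small square factor,
-- while on inputs with a tiny square factor A exits early as well.

-- ===== PORT A =====
def mi (n : Int) : Int :=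
  if n = 1 then 1
  else if (PySem.List.pyRange 2 (n+1) 1).any (fun i => PySem.Int.mod n (i^2) == 0) then 0
  else
    let r := (PySem.List.pyRange 2 n 1).foldl
      (fun r i => if PySem.Int.mod n i == 0 then r + 1 else r) (0 : Int)
    if r = 0 then -1 else (-1 : Int) ^ r.toNat

-- ===== PORT B =====
-- termination measure fact for B's while loop (cited by the port's decreasing_by)
theorem miAltLoop_measure {n i : Int} (h : i * i ≤ n) :
    (n + 1 - (i + 1)).toNat < (n + 1 - i).toNat := by
  have hii : i ≤ i * i := by nlinarith [mul_self_nonneg i, mul_self_nonneg (i - 1)]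
  omega

def miAltLoop (n i : Int) (hasDiv : Bool) : Int :=
  if h : i * i ≤ n then
    if PySem.Int.mod n (i * i) == 0 then 0
    else miAltLoop n (i + 1) (hasDiv || (PySem.Int.mod n i == 0))
  else if hasDiv then 1 else -1
termination_by (n + 1 - i).toNat
decreasing_by exact miAltLoop_measure h

def mi_alt (n : Int) : Int :=
  if n = 1 then 1 else miAltLoop n 2 false

-- ===== PRECONDITION & SPEC =====
def Spec_mi (n : Int) (out : Int) : Prop := out = mi_alt n
instance (n : Int) (out : Int) : Decidable (Spec_mi n out) := by unfold Spec_mi; infer_instance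

-- ===== CLAIM (what is proved, stated in full; the proofs are below) =====
def Claim_equal_mi : Prop := ∀ (n : Int), Dom_mi n → Spec_mi n (mi n)

-- ===== LEMMAS AND PROOFS =====

-- splitting a bounded ∃ at its left endpoint
theorem exists_Icc_split (i n : Int) (h : i ≤ n) (P : Int → Prop) :
    (∃ j ∈ Finset.Icc i n, P j) ↔ P i ∨ ∃ j ∈ Finset.Icc (i+1) n, P j := by
  simp only [Finset.mem_Icc]
  constructor
  · rintro ⟨j, ⟨hj1, hj2⟩, hP⟩
    rcases eq_or_lt_of_le hj1 with rfl | hlt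
    · exact Or.inl hP
    · exact Or.inr ⟨j, ⟨by omega, hj2⟩, hP⟩
  · rintro (hP | ⟨j, ⟨hj1, hj2⟩, hP⟩)
    · exact ⟨i, ⟨le_refl _, h⟩, hP⟩
    · exact ⟨j, ⟨by omega, hj2⟩, hP⟩

-- characterisation of B's single √n scan
theorem miAltLoop_char (n i : Int) (b : Bool) :
    2 ≤ i → miAltLoop n i b =
      if ∃ j ∈ Finset.Icc i n, j * j ≤ n ∧ (j * j) ∣ n then 0
      else if b = true ∨ ∃ j ∈ Finset.Icc i n, j * j ≤ n ∧ j ∣ n then 1 else -1 := by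
  induction i, b using miAltLoop.induct n with
  | case1 i b h hm =>
    intro h2
    have hdvd : (i * i) ∣ n := (PySem.Int.mod_eq_zero_iff_dvd n (i*i)).1 (by simpa using hm)
    have hin : i ≤ n := le_trans (by nlinarith) h
    rw [miAltLoop]
    simp only [h, hm, dif_pos, if_pos]
    rw [if_pos ⟨i, Finset.mem_Icc.2 ⟨le_refl _, hin⟩, h, hdvd⟩]
  | case2 i b h hm ih =>
    intro h2
    have hndvd : ¬ (i * i) ∣ n := fun hd => hm (by simp [(PySem.Int.mod_eq_zero_iff_dvd n (i*i)).2 hd])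
    have hin : i ≤ n := le_trans (by nlinarith) h
    rw [miAltLoop]
    simp only [h, dif_pos, hm, if_neg, Bool.not_eq_true]
    · rw [ih (by omega)]
      have e1 := exists_Icc_split i n hin (fun j => j * j ≤ n ∧ (j * j) ∣ n)
      have e2 := exists_Icc_split i n hin (fun j => j * j ≤ n ∧ j ∣ n)
      simp only [e1, e2, hndvd, and_false, false_or]
      by_cases hex : ∃ j ∈ Finset.Icc (i+1) n, j * j ≤ n ∧ (j * j) ∣ n
      · rw [if_pos hex, if_pos hex]
      · simp only [hex, if_false]
        have : ((b || PySem.Int.mod n i == 0) = true) ↔ (b = true ∨ (i * i ≤ n ∧ i ∣ n)) := by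
          rw [Bool.or_eq_true]
          constructor
          · rintro (hb | hmod)
            · exact Or.inl hb
            · exact Or.inr ⟨h, (PySem.Int.mod_eq_zero_iff_dvd n i).1 (by simpa using hmod)⟩
          · rintro (hb | ⟨_, hdv⟩)
            · exact Or.inl hb
            · exact Or.inr (by simp [(PySem.Int.mod_eq_zero_iff_dvd n i).2 hdv])
        exact if_congr (by rw [this, or_assoc]) rfl rfl
  | case3 i h =>
    intro h2
    have hno : ∀ j ∈ Finset.Icc i n, ¬ (j * j ≤ n) := by
      intro j hj
      have := (Finset.mem_Icc.1 hj).1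
      nlinarith
    have hnsq : ¬ ∃ j ∈ Finset.Icc i n, j * j ≤ n ∧ (j * j) ∣ n := by
      rintro ⟨j, hj, hle, _⟩; exact hno j hj hle
    rw [miAltLoop, dif_neg h, if_neg hnsq, if_pos (Or.inl rfl)]
    simp
  | case4 i b h hb =>
    intro h2
    have hno : ∀ j ∈ Finset.Icc i n, ¬ (j * j ≤ n) := by
      intro j hj
      have := (Finset.mem_Icc.1 hj).1
      nlinarith
    have hnsq : ¬ ∃ j ∈ Finset.Icc i n, j * j ≤ n ∧ (j * j) ∣ n := by
      rintro ⟨j, hj, hle, _⟩; exact hno j hj hle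
    rw [miAltLoop, dif_neg h, if_neg hb, if_neg hnsq, if_neg]
    rintro (hb' | ⟨j, hj, hle, _⟩)
    · exact hb hb'
    · exact hno j hj hle

-- A's first scan hits ↔ n has a square factor i² with 2 ≤ i ≤ n
theorem any_sq_iff (n : Int) :
    ((PySem.List.pyRange 2 (n+1) 1).any (fun i => PySem.Int.mod n (i^2) == 0) = true)
      ↔ ∃ i ∈ Finset.Icc 2 n, (i * i) ∣ n := by
  simp only [List.any_eq_true, PySem.List.mem_pyRange_one, Finset.mem_Icc, beq_iff_eq,
    PySem.Int.mod_eq_zero_iff_dvd, pow_two]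
  constructor
  · rintro ⟨i, ⟨h1, h2⟩, hd⟩; exact ⟨i, ⟨h1, by omega⟩, hd⟩
  · rintro ⟨i, ⟨h1, h2⟩, hd⟩; exact ⟨i, ⟨h1, by omega⟩, hd⟩

-- A's second scan counts the divisors of n strictly between 1 and n
theorem count_eq (n : Int) :
    ((PySem.List.pyRange 2 n 1).countP (fun i => PySem.Int.mod n i == 0) : Nat)
      = ((Finset.Ico 2 n).filter (fun d => d ∣ n)).card := by
  rw [List.countP_eq_length_filter]
  have hnd : ((PySem.List.pyRange 2 n 1).filter (fun i => PySem.Int.mod n i == 0)).Nodup :=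
    (PySem.List.nodup_pyRange_one 2 n).filter _
  rw [← List.toFinset_card_of_nodup hnd]
  congr 1
  ext x
  simp [PySem.List.mem_pyRange_one, Finset.mem_Ico, PySem.Int.mod_eq_zero_iff_dvd]

-- a proper divisor yields a divisor at most √n
theorem small_divisor (n j : Int) (hn : 2 ≤ n) (h2 : 2 ≤ j) (hjn : j < n) (hd : j ∣ n) :
    ∃ k, 2 ≤ k ∧ k * k ≤ n ∧ k ∣ n := by
  obtain ⟨e, he⟩ := hd
  have hepos : 1 ≤ e := by nlinarith
  have he2 : 2 ≤ e := by
    rcases eq_or_lt_of_le hepos with rfl | h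
    · omega
    · omega
  rcases Int.lt_or_le n (j * j) with h | h
  · refine ⟨e, he2, ?_, ⟨j, by linarith [he, mul_comm j e]⟩⟩
    nlinarith
  · exact ⟨j, h2, h, ⟨e, he⟩⟩

-- with no square factor, the divisors strictly between 1 and n pair off d ↦ n / d : their number is even
theorem card_even (n : Int) (hn : 2 ≤ n)
    (hsf : ∀ i, 2 ≤ i → i ≤ n → ¬ (i * i) ∣ n) :
    Even ((Finset.Ico 2 n).filter (fun d => d ∣ n)).card := by
  set S := (Finset.Ico 2 n).filter (fun d => d ∣ n) with hS
  have hmem : ∀ d ∈ S, 2 ≤ d ∧ d < n ∧ d ∣ n := by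
    intro d hd
    simp only [hS, Finset.mem_filter, Finset.mem_Ico] at hd
    exact ⟨hd.1.1, hd.1.2, hd.2⟩
  have hne : ∀ d ∈ S, d * d ≠ n := by
    intro d hd heq
    obtain ⟨h2, hlt, hdvd⟩ := hmem d hd
    exact hsf d h2 (by omega) (heq ▸ dvd_refl n)
  have hsplit := Finset.card_filter_add_card_filter_not
    (s := S) (p := fun d => d * d < n)
  have hbij : (S.filter (fun d => d * d < n)).card
      = (S.filter (fun d => ¬ d * d < n)).card := by
    apply Finset.card_bij' (i := fun d _ => n / d) (j := fun e _ => n / e)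
    · intro d hd
      simp only [Finset.mem_filter] at hd
      obtain ⟨h2, hlt, hdvd⟩ := hmem d hd.1
      have hdd := hd.2
      have hcan : n / d * d = n := Int.ediv_mul_cancel hdvd
      have hdle : d < n / d := by nlinarith
      have hlt2 : n / d < n := by nlinarith
      have hdvd2 : (n / d) ∣ n := ⟨d, hcan.symm⟩
      have : ¬ (n / d) * (n / d) < n := by nlinarith
      simp only [Finset.mem_filter, hS, Finset.mem_Ico]
      exact ⟨⟨⟨by omega, hlt2⟩, hdvd2⟩, this⟩
    · intro e he
      simp only [Finset.mem_filter] at he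
      obtain ⟨h2, hlt, hdvd⟩ := hmem e he.1
      have hee := he.2
      have hcan : n / e * e = n := Int.ediv_mul_cancel hdvd
      have hgt : e * e > n := by
        rcases Int.lt_or_le n (e * e) with h | h
        · exact h
        · exact absurd (lt_of_le_of_ne h (fun h' => hne e he.1 h')) hee
      have hpos : 1 ≤ n / e := by nlinarith
      have hlt1 : n / e < e := by nlinarith
      have hne1 : n / e ≠ 1 := by
        intro h1
        rw [h1, one_mul] at hcan
        omega
      have hdvd2 : (n / e) ∣ n := ⟨e, hcan.symm⟩
      have hsq : (n / e) * (n / e) < n := by nlinarith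
      simp only [Finset.mem_filter, hS, Finset.mem_Ico]
      exact ⟨⟨⟨by omega, by nlinarith⟩, hdvd2⟩, hsq⟩
    · intro d hd
      simp only [Finset.mem_filter] at hd
      obtain ⟨h2, hlt, hdvd⟩ := hmem d hd.1
      have hcan : n / d * d = n := Int.ediv_mul_cancel hdvd
      have hne0 : n / d ≠ 0 := by
        intro h0; rw [h0, zero_mul] at hcan; omega
      calc n / (n / d) = (n / d * d) / (n / d) := by rw [hcan]
        _ = d := by rw [mul_comm, Int.mul_ediv_cancel d hne0]
    · intro e he
      simp only [Finset.mem_filter] at he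
      obtain ⟨h2, hlt, hdvd⟩ := hmem e he.1
      have hcan : n / e * e = n := Int.ediv_mul_cancel hdvd
      have hne0 : n / e ≠ 0 := by
        intro h0; rw [h0, zero_mul] at hcan; omega
      calc n / (n / e) = (n / e * e) / (n / e) := by rw [hcan]
        _ = e := by rw [mul_comm, Int.mul_ediv_cancel e hne0]
  refine ⟨(S.filter (fun d => d * d < n)).card, by omega⟩

theorem mi_spec_ge_two (n : Int) (hn : 2 ≤ n) : mi n = mi_alt n := by
  have hne1 : n ≠ 1 := by omega
  rw [mi, mi_alt, if_neg hne1, if_neg hne1, miAltLoop_char n 2 false (le_refl 2)]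
  by_cases hsq : ∃ i ∈ Finset.Icc 2 n, (i * i) ∣ n
  · rw [if_pos ((any_sq_iff n).2 hsq), if_pos (by
      obtain ⟨i, hi, hd⟩ := hsq
      exact ⟨i, hi, Int.le_of_dvd (by omega) hd, hd⟩)]
  · have hBsq : ¬ ∃ j ∈ Finset.Icc 2 n, j * j ≤ n ∧ (j * j) ∣ n := by
      rintro ⟨j, hj, _, hd⟩; exact hsq ⟨j, hj, hd⟩
    rw [if_neg (fun h => hsq ((any_sq_iff n).1 h))]
    have hsf : ∀ i, 2 ≤ i → i ≤ n → ¬ (i * i) ∣ n := by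
      intro i h2 hin hd
      exact hsq ⟨i, Finset.mem_Icc.2 ⟨h2, hin⟩, hd⟩
    have hr : (PySem.List.pyRange 2 n 1).foldl
        (fun r i => if PySem.Int.mod n i == 0 then r + 1 else r) (0 : Int)
        = (((Finset.Ico 2 n).filter (fun d => d ∣ n)).card : Int) := by
      rw [PySem.List.foldl_if_add_one, zero_add]
      exact_mod_cast congrArg (fun k : Nat => (k : Int)) (count_eq n)
    simp only [hr]
    by_cases hc : ((Finset.Ico 2 n).filter (fun d => d ∣ n)).card = 0
    · rw [if_pos (by exact_mod_cast hc), if_neg hBsq, if_neg]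
      rintro (hb | ⟨j, hj, hle, hd⟩)
      · exact absurd hb (by simp)
      · have h2 := (Finset.mem_Icc.1 hj).1
        have hjn : j < n := by nlinarith
        have hmem : j ∈ (Finset.Ico 2 n).filter (fun d => d ∣ n) := by
          simp only [Finset.mem_filter, Finset.mem_Ico]
          exact ⟨⟨h2, hjn⟩, hd⟩
        rw [Finset.card_eq_zero] at hc
        simp [hc] at hmem
    · obtain ⟨d, hdS⟩ := Finset.card_pos.1 (Nat.pos_of_ne_zero hc)
      simp only [Finset.mem_filter, Finset.mem_Ico] at hdS
      obtain ⟨⟨h2, hlt⟩, hdvd⟩ := hdS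
      obtain ⟨k, hk2, hkk, hkd⟩ := small_divisor n d hn h2 hlt hdvd
      rw [if_neg (by exact_mod_cast hc), if_neg hBsq, if_pos (Or.inr ⟨k,
        Finset.mem_Icc.2 ⟨hk2, by nlinarith⟩, hkk, hkd⟩)]
      have hev : Even (((Finset.Ico 2 n).filter (fun d => d ∣ n)).card) := card_even n hn hsf
      rw [Int.toNat_natCast]
      exact Even.neg_one_pow hev

-- ===== VERDICT (by name: the statement is the Claim_ definition above) =====
theorem mi_spec : Claim_equal_mi := by
  intro n _
  unfold Spec_mi
  rcases Int.lt_or_le n 2 with hlt | hge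
  · rcases eq_or_ne n 1 with rfl | hne
    · simp [mi, mi_alt]
    · -- n ≤ 0 : A's ranges are empty and B's loop test 4 ≤ n fails at once
      unfold mi mi_alt miAltLoop
      simp [hne, PySem.List.pyRange_one_eq_nil (by omega : (n:Int)+1 ≤ 2),
            PySem.List.pyRange_one_eq_nil (by omega : n ≤ 2)]
      omega
  · exact mi_spec_ge_two n hge
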